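-- pv_equiv track=rewrite | github.com/BatteryRock/open-toontown | toontown/battle/BattleBase.py | findToonAttack
-- ===== SOURCE A (Python) =====
-- TOON_TRACK_COL = 1
--
-- TOON_LVL_COL = 2
--
-- def findToonAttack(toons, attacks, track):
--     foundAttacks = []
--     for t in toons:
--         if t in attacks and (attack := attacks[t])[TOON_TRACK_COL] == track:
--             # Check if the attack's track matches the given track
--             higher_level = True
--             for b in foundAttacks:
--                 if attack[TOON_LVL_COL] <= b[TOON_LVL_COL]:
--                     higher_level = False
--                     break
--             if higher_level:
--                 foundAttacks = [attack]
--     return foundAttacks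
-- ===== SOURCE B (Python) =====
-- TOON_TRACK_COL = 1
--
-- TOON_LVL_COL = 2
--
-- def findToonAttack(toons, attacks, track):
--     # Two passes: filter the matching attacks, then pick the first one of maximal level.
--     cand = [attacks[t] for t in toons if t in attacks and attacks[t][TOON_TRACK_COL] == track]
--     if not cand:
--         return []
--     return [max(cand, key=lambda a: a[TOON_LVL_COL])]
-- ===== Notes on version B (the rewrite author's own statement) =====
-- stated objective: simpler
-- what changed: A's single pass with an inline running-max (rebuilding a one-element list and re-scanning it per candidate) is replaced by a filter pass collecting the matching attacks followed by one max(..., key=level) selection, relying on max's first-maximal tie-break.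
-- outside the precondition, e.g. on findToonAttack([1], {1: [0, 5]}, 5): A returns [[0, 5]], B raises IndexError
import Mathlib
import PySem

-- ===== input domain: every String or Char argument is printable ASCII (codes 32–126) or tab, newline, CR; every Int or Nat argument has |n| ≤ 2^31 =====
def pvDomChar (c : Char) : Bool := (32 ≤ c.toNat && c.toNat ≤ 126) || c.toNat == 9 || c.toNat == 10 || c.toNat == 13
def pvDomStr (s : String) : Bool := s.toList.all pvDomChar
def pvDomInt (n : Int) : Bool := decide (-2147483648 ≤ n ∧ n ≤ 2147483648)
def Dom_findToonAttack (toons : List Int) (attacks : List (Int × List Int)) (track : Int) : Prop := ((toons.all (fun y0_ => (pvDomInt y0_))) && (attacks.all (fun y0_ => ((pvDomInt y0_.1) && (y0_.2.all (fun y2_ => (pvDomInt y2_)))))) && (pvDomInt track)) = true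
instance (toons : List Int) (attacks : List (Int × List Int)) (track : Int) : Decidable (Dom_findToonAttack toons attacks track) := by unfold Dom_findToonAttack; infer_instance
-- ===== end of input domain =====

-- B replaces A's inline running-max single pass by a filter pass followed by a first-maximal
-- selection (max with key); objective: simpler.


-- ===== PORT A =====
-- inner loop 'for b in foundAttacks: if attack[2] <= b[2]: higher_level = False; break'
-- (a missing index means Python raised there; such inputs are outside Pre_)
def pvCheckHigher (attack : List Int) : List (List Int) → Bool
  | [] => true
  | b :: rest =>
    match PySem.List.pyGet? attack 2, PySem.List.pyGet? b 2 with
    | some x, some y => if x ≤ y then false else pvCheckHigher attack rest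
    | _, _ => false

-- one iteration of A's 'for t in toons' body
def pvStepA (attacks : List (Int × List Int)) (track : Int)
    (foundAttacks : List (List Int)) (t : Int) : List (List Int) :=
  match PySem.Dict.get? (PySem.Dict.mk attacks) t with
  | none => foundAttacks
  | some attack =>
    match PySem.List.pyGet? attack 1 with
    | none => foundAttacks          -- Python raised (outside Pre_)
    | some v =>
      if v = track then
        if pvCheckHigher attack foundAttacks then [attack] else foundAttacks
      else foundAttacks

def findToonAttack (toons : List Int) (attacks : List (Int × List Int)) (track : Int) : List (List Int) :=
  toons.foldl (pvStepA attacks track) []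

-- ===== PORT B =====
-- 't in attacks and attacks[t][TOON_TRACK_COL] == track' filter of the comprehension
def pvCand (attacks : List (Int × List Int)) (track : Int) (t : Int) : Option (List Int) :=
  match PySem.Dict.get? (PySem.Dict.mk attacks) t with
  | none => none
  | some a => if PySem.List.pyGet? a 1 = some track then some a else none

def findToonAttack_alt (toons : List Int) (attacks : List (Int × List Int)) (track : Int) : List (List Int) :=
  let cand := toons.filterMap (pvCand attacks track)
  -- max(cand, key=lambda a: a[2]); pyGetD is exact under Pre_ (every candidate has a level column)
  match PySem.List.max? cand (fun a => PySem.List.pyGetD a 2 0) with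
  | none => []
  | some m => [m]

-- ===== PRECONDITION & SPEC =====
-- Pre_ excludes inputs where a toon's attack row is too short: A raises IndexError reading the
-- track column, and on a matched row without a level column B's max raises IndexError while A
-- may still return it when it is the only candidate.
def pvAttackOK (track : Int) : Option (List Int) → Bool
  | none => true
  | some a => (PySem.List.pyGet? a 1).isSome &&
      (!(PySem.List.pyGet? a 1 == some track) || (PySem.List.pyGet? a 2).isSome)

def Pre_findToonAttack (toons : List Int) (attacks : List (Int × List Int)) (track : Int) : Prop :=
  (toons.all (fun t => pvAttackOK track (PySem.Dict.get? (PySem.Dict.mk attacks) t))) = true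

instance (toons : List Int) (attacks : List (Int × List Int)) (track : Int) : Decidable (Pre_findToonAttack toons attacks track) := by unfold Pre_findToonAttack; infer_instance

def pvWitness_findToonAttack : List Int × (List (Int × List Int)) × Int :=
  ([1, 2, 3], [(1, [7, 5, 2]), (2, [8, 5, 4])], 5)

def Spec_findToonAttack (toons : List Int) (attacks : List (Int × List Int)) (track : Int) (out : List (List Int)) : Prop := out = findToonAttack_alt toons attacks track
instance (toons : List Int) (attacks : List (Int × List Int)) (track : Int) (out : List (List Int)) : Decidable (Spec_findToonAttack toons attacks track out) := by unfold Spec_findToonAttack; infer_instance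

-- ===== CLAIM (what is proved, stated in full; the proofs are below) =====
def Claim_equal_findToonAttack : Prop := ∀ (toons : List Int) (attacks : List (Int × List Int)) (track : Int), Dom_findToonAttack toons attacks track → Pre_findToonAttack toons attacks track → Spec_findToonAttack toons attacks track (findToonAttack toons attacks track)

-- ===== LEMMAS AND PROOFS =====

-- the step of PySem.List.max? with key a[2], as a named function
def pvMaxStep (acc : Option (List Int)) (x : List Int) : Option (List Int) :=
  match acc with
  | none => some x
  | some m => if PySem.List.pyGetD m 2 0 < PySem.List.pyGetD x 2 0 then some x else some m

theorem pv_max_eq (xs : List (List Int)) :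
    PySem.List.max? xs (fun a => PySem.List.pyGetD a 2 0) = xs.foldl pvMaxStep none := by
  unfold PySem.List.max?
  congr 1
  funext acc x
  cases acc <;> rfl

-- a candidate row is "good" when its level column exists
def pvGood (a : List Int) : Prop := (PySem.List.pyGet? a 2).isSome = true

-- the main loop invariant: A's fold over toons, started from acc ([] or [m]),
-- equals the max?-fold over the remaining candidates started from the matching Option.
theorem pv_loop_eq (attacks : List (Int × List Int)) (track : Int) :
    ∀ (toons : List Int) (acc : Option (List Int)),
      (∀ m, acc = some m → pvGood m) →
      Pre_findToonAttack toons attacks track →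
      toons.foldl (pvStepA attacks track) (acc.elim [] (fun m => [m]))
      = ((toons.filterMap (pvCand attacks track)).foldl pvMaxStep acc).elim [] (fun m => [m]) := by
  intro toons
  induction toons with
  | nil => intro acc _ _; simp
  | cons t rest ih =>
    intro acc hgood hpre
    have hpre' : Pre_findToonAttack rest attacks track ∧
        pvAttackOK track (PySem.Dict.get? (PySem.Dict.mk attacks) t) = true := by
      unfold Pre_findToonAttack at hpre ⊢
      simp [List.all_cons] at hpre
      exact ⟨by simp [List.all_eq_true]; exact hpre.2, hpre.1⟩
    simp only [List.foldl_cons, List.filterMap_cons]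
    cases hget : PySem.Dict.get? (PySem.Dict.mk attacks) t with
    | none =>
      simp only [pvStepA, pvCand, hget]
      exact ih acc hgood hpre'.1
    | some a =>
      have hok := hpre'.2
      rw [hget] at hok
      unfold pvAttackOK at hok
      simp only [Bool.and_eq_true, Bool.or_eq_true, Option.isSome_iff_exists] at hok
      obtain ⟨⟨v, hv⟩, hok2⟩ := hok
      by_cases hvt : v = track
      · -- candidate row
        subst hvt
        have hga : pvGood a := by
          unfold pvGood
          rcases hok2 with h | h
          · exfalso; revert h; simp [hv]
          · simpa [Option.isSome_iff_exists] using h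
        cases acc with
        | none =>
          simp only [pvStepA, pvCand, hget, hv, Option.elim,
            pvCheckHigher, if_pos]
          exact ih (some a) (by intro m hm; cases hm; exact hga) hpre'.1
        | some m =>
          have hgm : pvGood m := hgood m rfl
          obtain ⟨x, hx⟩ : ∃ x, PySem.List.pyGet? a 2 = some x := by
            simpa [pvGood, Option.isSome_iff_exists] using hga
          obtain ⟨y, hy⟩ : ∃ y, PySem.List.pyGet? m 2 = some y := by
            simpa [pvGood, Option.isSome_iff_exists] using hgm
          have hda : PySem.List.pyGetD a 2 0 = x := by simp [PySem.List.pyGetD, hx]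
          have hdm : PySem.List.pyGetD m 2 0 = y := by simp [PySem.List.pyGetD, hy]
          by_cases hle : x ≤ y
          · simpa [pvStepA, pvCand, pvMaxStep, hget, hv, hda, hdm, pvCheckHigher, hx, hy,
              hle, not_lt.mpr hle] using
              ih (some m) (by intro m' hm'; cases hm'; exact hgm) hpre'.1
          · simpa [pvStepA, pvCand, pvMaxStep, hget, hv, hda, hdm, pvCheckHigher, hx, hy,
              hle, lt_of_not_ge hle] using
              ih (some a) (by intro m' hm'; cases hm'; exact hga) hpre'.1
      · have hne : ¬ ((some v : Option Int) = some track) := by simpa using hvt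
        simp only [pvStepA, pvCand, hget, hv, if_neg hvt, if_neg hne]
        exact ih acc hgood hpre'.1

-- ===== VERDICT (by name: the statement is the Claim_ definition above) =====
theorem findToonAttack_spec : Claim_equal_findToonAttack := by
  intro toons attacks track _ hpre
  unfold Spec_findToonAttack findToonAttack findToonAttack_alt
  have h := pv_loop_eq attacks track toons none (by intro m hm; cases hm) hpre
  simp only [Option.elim] at h
  rw [h]
  simp only [pv_max_eq]
  cases hfold : (toons.filterMap (pvCand attacks track)).foldl pvMaxStep none with
  | none => rfl
  | some m => rfl
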